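-- pv_equiv track=rewrite | github.com/sri-123-lakshmi/Real-Time-Customer-Feedback-Analyzer-Sentiment-Monitoring-Automation | modules/categorizer.py | categorize_feedback
-- ===== SOURCE A (Python) =====
-- def categorize_feedback(message):
--     msg = message.lower()
--
--     if any(word in msg for word in ["delay", "late", "shipping"]):
--         return "Delivery Delay"
--     elif any(word in msg for word in ["bill", "charge", "payment"]):
--         return "Billing Problem"
--     elif any(word in msg for word in ["app", "website", "login", "error"]):
--         return "App/Website Issue"
--     elif any(word in msg for word in ["service", "support", "staff"]):
--         return "Service Issue"
--     elif any(word in msg for word in ["thank", "love", "great"]):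
--         return "General Appreciation"
--     else:
--         return "Other"
-- ===== SOURCE B (Python) =====
-- CATEGORIES = ["Delivery Delay", "Billing Problem", "App/Website Issue",
--               "Service Issue", "General Appreciation"]
--
-- # flat multi-pattern table: keyword -> category priority index
-- KEYWORDS = [("delay", 0), ("late", 0), ("shipping", 0),
--             ("bill", 1), ("charge", 1), ("payment", 1),
--             ("app", 2), ("website", 2), ("login", 2), ("error", 2),
--             ("service", 3), ("support", 3), ("staff", 3),
--             ("thank", 4), ("love", 4), ("great", 4)]
--
--
-- def categorize_feedback(message):
--     # single left-to-right scan over message positions (naive multi-pattern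
--     # matcher); keeps the minimal (= highest-priority) matched category index
--     msg = message.lower()
--     best = len(CATEGORIES)  # 5 = nothing matched yet
--     for i in range(len(msg)):
--         for kw, cat in KEYWORDS:
--             if cat < best and msg.startswith(kw, i):
--                 best = cat
--     return CATEGORIES[best] if best < len(CATEGORIES) else "Other"
-- ===== Notes on version B (the rewrite author's own statement) =====
-- stated objective: alternative
-- what changed: Replaces the if/elif chain of per-keyword substring tests with a single left-to-right scan over message positions (naive multi-pattern matcher over a flat keyword->priority table) that keeps the minimal matched category index.
import Mathlib
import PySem

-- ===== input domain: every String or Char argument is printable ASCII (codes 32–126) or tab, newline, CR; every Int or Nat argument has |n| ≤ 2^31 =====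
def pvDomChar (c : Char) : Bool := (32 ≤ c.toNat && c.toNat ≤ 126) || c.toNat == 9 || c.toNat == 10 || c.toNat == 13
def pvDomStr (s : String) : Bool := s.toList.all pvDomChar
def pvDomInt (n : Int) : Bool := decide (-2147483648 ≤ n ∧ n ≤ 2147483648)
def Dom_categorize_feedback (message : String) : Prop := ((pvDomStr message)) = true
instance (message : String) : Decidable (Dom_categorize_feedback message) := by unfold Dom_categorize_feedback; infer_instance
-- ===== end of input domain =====

-- B replaces A's if/elif chain of per-keyword substring tests by a single left-to-right
-- scan over the message positions (a naive multi-pattern matcher over a flat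
-- keyword -> priority table) keeping the minimal matched category index (alternative).

-- ===== PORT A =====
def categorize_feedback (message : String) : String :=
  let msg := PySem.Str.lower message
  if ["delay", "late", "shipping"].any (fun word => PySem.Str.isIn word msg) then "Delivery Delay"
  else if ["bill", "charge", "payment"].any (fun word => PySem.Str.isIn word msg) then "Billing Problem"
  else if ["app", "website", "login", "error"].any (fun word => PySem.Str.isIn word msg) then "App/Website Issue"
  else if ["service", "support", "staff"].any (fun word => PySem.Str.isIn word msg) then "Service Issue"
  else if ["thank", "love", "great"].any (fun word => PySem.Str.isIn word msg) then "General Appreciation"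
  else "Other"

-- ===== PORT B =====
def bCategories : List String :=
  ["Delivery Delay", "Billing Problem", "App/Website Issue", "Service Issue", "General Appreciation"]

-- Source B's KEYWORDS table; keywords kept as char lists since the position scan works on characters
def bKeywords : List (List Char × Nat) :=
  [("delay".toList, 0), ("late".toList, 0), ("shipping".toList, 0),
   ("bill".toList, 1), ("charge".toList, 1), ("payment".toList, 1),
   ("app".toList, 2), ("website".toList, 2), ("login".toList, 2), ("error".toList, 2),
   ("service".toList, 3), ("support".toList, 3), ("staff".toList, 3),
   ("thank".toList, 4), ("love".toList, 4), ("great".toList, 4)]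

-- inner loop 'for kw, cat in KEYWORDS: if cat < best and msg.startswith(kw, i): best = cat';
-- msg.startswith(kw, i) is exact as PySem.Chars.startswith on the suffix msg.drop i (0 ≤ i ≤ len)
def bInner (s : List Char) (best : Nat) : Nat :=
  bKeywords.foldl (fun b p => if p.2 < b ∧ PySem.Chars.startswith s p.1 then p.2 else b) best

-- outer loop 'for i in range(len(msg))': position i is represented by the suffix msg.drop i
def bScan : List Char → Nat → Nat
  | [], best => best
  | c :: t, best => bScan t (bInner (c :: t) best)

def categorize_feedback_alt (message : String) : String :=
  let msg := (PySem.Str.lower message).toList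
  let best := bScan msg 5
  -- 'CATEGORIES[best] if best < len(CATEGORIES) else "Other"'; getD is exact: best < 5 is in range
  if best < 5 then bCategories.getD best "Other" else "Other"

-- ===== PRECONDITION & SPEC =====
def Spec_categorize_feedback (message : String) (out : String) : Prop := out = categorize_feedback_alt message
instance (message : String) (out : String) : Decidable (Spec_categorize_feedback message out) := by unfold Spec_categorize_feedback; infer_instance

-- ===== CLAIM (what is proved, stated in full; the proofs are below) =====
def Claim_equal_categorize_feedback : Prop := ∀ (message : String), Dom_categorize_feedback message → Spec_categorize_feedback message (categorize_feedback message)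

-- ===== LEMMAS AND PROOFS =====
set_option maxHeartbeats 1000000

theorem bKeywords_cases (p : List Char × Nat) (hp : p ∈ bKeywords) :
    p = ("delay".toList, 0) ∨ p = ("late".toList, 0) ∨ p = ("shipping".toList, 0) ∨
    p = ("bill".toList, 1) ∨ p = ("charge".toList, 1) ∨ p = ("payment".toList, 1) ∨
    p = ("app".toList, 2) ∨ p = ("website".toList, 2) ∨ p = ("login".toList, 2) ∨ p = ("error".toList, 2) ∨
    p = ("service".toList, 3) ∨ p = ("support".toList, 3) ∨ p = ("staff".toList, 3) ∨
    p = ("thank".toList, 4) ∨ p = ("love".toList, 4) ∨ p = ("great".toList, 4) := by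
  simpa [bKeywords] using hp

theorem bFold_le (l : List (List Char × Nat)) (s : List Char) (b : Nat) :
    l.foldl (fun b p => if p.2 < b ∧ PySem.Chars.startswith s p.1 then p.2 else b) b ≤ b := by
  induction l generalizing b with
  | nil => simp
  | cons q rest ih =>
      simp only [List.foldl_cons]
      refine le_trans (ih _) ?_
      split_ifs with h
      · omega
      · exact le_refl b

theorem bFold_le_of_mem (l : List (List Char × Nat)) (s : List Char) (b : Nat)
    (p : List Char × Nat) (hp : p ∈ l) (hs : PySem.Chars.startswith s p.1 = true) :
    l.foldl (fun b p => if p.2 < b ∧ PySem.Chars.startswith s p.1 then p.2 else b) b ≤ p.2 := by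
  induction l generalizing b with
  | nil => cases hp
  | cons q rest ih =>
      simp only [List.foldl_cons]
      rcases List.mem_cons.mp hp with h | h
      · subst h
        by_cases hlt : p.2 < b
        · rw [if_pos ⟨hlt, hs⟩]; exact bFold_le rest s p.2
        · refine le_trans (bFold_le rest s _) ?_
          split_ifs with h'
          · omega
          · omega
      · exact ih _ h

theorem bFold_cases (l : List (List Char × Nat)) (s : List Char) (b : Nat) :
    l.foldl (fun b p => if p.2 < b ∧ PySem.Chars.startswith s p.1 then p.2 else b) b = b ∨
      ∃ p ∈ l, l.foldl (fun b p => if p.2 < b ∧ PySem.Chars.startswith s p.1 then p.2 else b) b = p.2 ∧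
        PySem.Chars.startswith s p.1 = true := by
  induction l generalizing b with
  | nil => exact Or.inl rfl
  | cons q rest ih =>
      simp only [List.foldl_cons]
      rcases ih (if q.2 < b ∧ PySem.Chars.startswith s q.1 then q.2 else b) with h | ⟨p, hp, heq, hs⟩
      · rw [h]
        split_ifs at h ⊢ with hq
        · exact Or.inr ⟨q, List.mem_cons_self .., rfl, hq.2⟩
        · exact Or.inl rfl
      · exact Or.inr ⟨p, List.mem_cons_of_mem _ hp, heq, hs⟩

theorem bScan_le (s : List Char) (b : Nat) : bScan s b ≤ b := by
  induction s generalizing b with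
  | nil => simp [bScan]
  | cons c t ih =>
      simp only [bScan]
      exact le_trans (ih _) (bFold_le _ _ _)

theorem bScan_le_of_match (s : List Char) (b : Nat) (p : List Char × Nat) (j : Nat)
    (hp : p ∈ bKeywords) (hj : p.1 <+: s.drop j) : bScan s b ≤ p.2 := by
  induction s generalizing b j with
  | nil =>
      exfalso
      have hne : p.1 ≠ [] := by
        rcases bKeywords_cases p hp with rfl|rfl|rfl|rfl|rfl|rfl|rfl|rfl|rfl|rfl|rfl|rfl|rfl|rfl|rfl|rfl <;> simp
      exact hne (List.prefix_nil.mp (by simpa using hj))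
  | cons c t ih =>
      cases j with
      | zero =>
          have hs : PySem.Chars.startswith (c :: t) p.1 = true :=
            (PySem.Chars.startswith_iff _ _).mpr (by simpa using hj)
          simp only [bScan]
          exact le_trans (bScan_le t _) (bFold_le_of_mem _ _ _ p hp hs)
      | succ j =>
          simp only [List.drop_succ_cons] at hj
          simp only [bScan]
          exact ih _ j hj

theorem bScan_cases (s : List Char) (b : Nat) :
    bScan s b = b ∨ ∃ p ∈ bKeywords, bScan s b = p.2 ∧ ∃ j, p.1 <+: s.drop j := by
  induction s generalizing b with
  | nil => exact Or.inl rfl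
  | cons c t ih =>
      simp only [bScan]
      rcases ih (bInner (c :: t) b) with h | ⟨p, hp, heq, j, hj⟩
      · rw [h]
        rcases bFold_cases bKeywords (c :: t) b with h' | ⟨p, hp, heq, hs⟩
        · exact Or.inl h'
        · exact Or.inr ⟨p, hp, heq, 0, by simpa using (PySem.Chars.startswith_iff _ _).mp hs⟩
      · exact Or.inr ⟨p, hp, heq, j + 1, by simpa using hj⟩

theorem bScan_eq_of (L : List Char) (c : Nat) (hc : c < 5)
    (hex : ∃ p ∈ bKeywords, p.2 = c ∧ ∃ j, p.1 <+: L.drop j)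
    (hmin : ∀ p ∈ bKeywords, p.2 < c → ¬ ∃ j, p.1 <+: L.drop j) : bScan L 5 = c := by
  obtain ⟨p, hp, hpc, j, hj⟩ := hex
  have hle : bScan L 5 ≤ c := hpc ▸ bScan_le_of_match L 5 p j hp hj
  rcases bScan_cases L 5 with h | ⟨q, hq, heq, hm⟩
  · omega
  · by_cases hlt : q.2 < c
    · exact absurd hm (hmin q hq hlt)
    · omega

theorem bScan_eq_five (L : List Char)
    (hnone : ∀ p ∈ bKeywords, ¬ ∃ j, p.1 <+: L.drop j) : bScan L 5 = 5 := by
  rcases bScan_cases L 5 with h | ⟨q, hq, heq, hm⟩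
  · exact h
  · exact absurd hm (hnone q hq)

-- characterization of the scan by which keywords occur as substrings
theorem bScan_char (L : List Char) :
    bScan L 5 =
      (if PySem.Chars.isIn "delay".toList L = true ∨ PySem.Chars.isIn "late".toList L = true ∨ PySem.Chars.isIn "shipping".toList L = true then 0
       else if PySem.Chars.isIn "bill".toList L = true ∨ PySem.Chars.isIn "charge".toList L = true ∨ PySem.Chars.isIn "payment".toList L = true then 1
       else if PySem.Chars.isIn "app".toList L = true ∨ PySem.Chars.isIn "website".toList L = true ∨ PySem.Chars.isIn "login".toList L = true ∨ PySem.Chars.isIn "error".toList L = true then 2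
       else if PySem.Chars.isIn "service".toList L = true ∨ PySem.Chars.isIn "support".toList L = true ∨ PySem.Chars.isIn "staff".toList L = true then 3
       else if PySem.Chars.isIn "thank".toList L = true ∨ PySem.Chars.isIn "love".toList L = true ∨ PySem.Chars.isIn "great".toList L = true then 4
       else 5) := by
  split_ifs with h0 h1 h2 h3 h4
  · refine bScan_eq_of L 0 (by omega) ?_ (by omega)
    rcases h0 with h | h | h
    · exact ⟨("delay".toList, 0), by simp [bKeywords], rfl, (PySem.Chars.exists_prefix_drop_iff_isIn _ _).mpr h⟩
    · exact ⟨("late".toList, 0), by simp [bKeywords], rfl, (PySem.Chars.exists_prefix_drop_iff_isIn _ _).mpr h⟩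
    · exact ⟨("shipping".toList, 0), by simp [bKeywords], rfl, (PySem.Chars.exists_prefix_drop_iff_isIn _ _).mpr h⟩
  · refine bScan_eq_of L 1 (by omega) ?_ ?_
    · rcases h1 with h | h | h
      · exact ⟨("bill".toList, 1), by simp [bKeywords], rfl, (PySem.Chars.exists_prefix_drop_iff_isIn _ _).mpr h⟩
      · exact ⟨("charge".toList, 1), by simp [bKeywords], rfl, (PySem.Chars.exists_prefix_drop_iff_isIn _ _).mpr h⟩
      · exact ⟨("payment".toList, 1), by simp [bKeywords], rfl, (PySem.Chars.exists_prefix_drop_iff_isIn _ _).mpr h⟩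
    · intro p hp hlt hex
      have hin := (PySem.Chars.exists_prefix_drop_iff_isIn _ _).mp hex
      rcases bKeywords_cases p hp with rfl|rfl|rfl|rfl|rfl|rfl|rfl|rfl|rfl|rfl|rfl|rfl|rfl|rfl|rfl|rfl
      · exact h0 (Or.inl hin)
      · exact h0 (Or.inr (Or.inl hin))
      · exact h0 (Or.inr (Or.inr hin))
      · exact absurd hlt (by norm_num)
      · exact absurd hlt (by norm_num)
      · exact absurd hlt (by norm_num)
      · exact absurd hlt (by norm_num)
      · exact absurd hlt (by norm_num)
      · exact absurd hlt (by norm_num)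
      · exact absurd hlt (by norm_num)
      · exact absurd hlt (by norm_num)
      · exact absurd hlt (by norm_num)
      · exact absurd hlt (by norm_num)
      · exact absurd hlt (by norm_num)
      · exact absurd hlt (by norm_num)
      · exact absurd hlt (by norm_num)
  · refine bScan_eq_of L 2 (by omega) ?_ ?_
    · rcases h2 with h | h | h | h
      · exact ⟨("app".toList, 2), by simp [bKeywords], rfl, (PySem.Chars.exists_prefix_drop_iff_isIn _ _).mpr h⟩
      · exact ⟨("website".toList, 2), by simp [bKeywords], rfl, (PySem.Chars.exists_prefix_drop_iff_isIn _ _).mpr h⟩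
      · exact ⟨("login".toList, 2), by simp [bKeywords], rfl, (PySem.Chars.exists_prefix_drop_iff_isIn _ _).mpr h⟩
      · exact ⟨("error".toList, 2), by simp [bKeywords], rfl, (PySem.Chars.exists_prefix_drop_iff_isIn _ _).mpr h⟩
    · intro p hp hlt hex
      have hin := (PySem.Chars.exists_prefix_drop_iff_isIn _ _).mp hex
      rcases bKeywords_cases p hp with rfl|rfl|rfl|rfl|rfl|rfl|rfl|rfl|rfl|rfl|rfl|rfl|rfl|rfl|rfl|rfl
      · exact h0 (Or.inl hin)
      · exact h0 (Or.inr (Or.inl hin))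
      · exact h0 (Or.inr (Or.inr hin))
      · exact h1 (Or.inl hin)
      · exact h1 (Or.inr (Or.inl hin))
      · exact h1 (Or.inr (Or.inr hin))
      · exact absurd hlt (by norm_num)
      · exact absurd hlt (by norm_num)
      · exact absurd hlt (by norm_num)
      · exact absurd hlt (by norm_num)
      · exact absurd hlt (by norm_num)
      · exact absurd hlt (by norm_num)
      · exact absurd hlt (by norm_num)
      · exact absurd hlt (by norm_num)
      · exact absurd hlt (by norm_num)
      · exact absurd hlt (by norm_num)
  · refine bScan_eq_of L 3 (by omega) ?_ ?_
    · rcases h3 with h | h | h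
      · exact ⟨("service".toList, 3), by simp [bKeywords], rfl, (PySem.Chars.exists_prefix_drop_iff_isIn _ _).mpr h⟩
      · exact ⟨("support".toList, 3), by simp [bKeywords], rfl, (PySem.Chars.exists_prefix_drop_iff_isIn _ _).mpr h⟩
      · exact ⟨("staff".toList, 3), by simp [bKeywords], rfl, (PySem.Chars.exists_prefix_drop_iff_isIn _ _).mpr h⟩
    · intro p hp hlt hex
      have hin := (PySem.Chars.exists_prefix_drop_iff_isIn _ _).mp hex
      rcases bKeywords_cases p hp with rfl|rfl|rfl|rfl|rfl|rfl|rfl|rfl|rfl|rfl|rfl|rfl|rfl|rfl|rfl|rfl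
      · exact h0 (Or.inl hin)
      · exact h0 (Or.inr (Or.inl hin))
      · exact h0 (Or.inr (Or.inr hin))
      · exact h1 (Or.inl hin)
      · exact h1 (Or.inr (Or.inl hin))
      · exact h1 (Or.inr (Or.inr hin))
      · exact h2 (Or.inl hin)
      · exact h2 (Or.inr (Or.inl hin))
      · exact h2 (Or.inr (Or.inr (Or.inl hin)))
      · exact h2 (Or.inr (Or.inr (Or.inr hin)))
      · exact absurd hlt (by norm_num)
      · exact absurd hlt (by norm_num)
      · exact absurd hlt (by norm_num)
      · exact absurd hlt (by norm_num)
      · exact absurd hlt (by norm_num)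
      · exact absurd hlt (by norm_num)
  · refine bScan_eq_of L 4 (by omega) ?_ ?_
    · rcases h4 with h | h | h
      · exact ⟨("thank".toList, 4), by simp [bKeywords], rfl, (PySem.Chars.exists_prefix_drop_iff_isIn _ _).mpr h⟩
      · exact ⟨("love".toList, 4), by simp [bKeywords], rfl, (PySem.Chars.exists_prefix_drop_iff_isIn _ _).mpr h⟩
      · exact ⟨("great".toList, 4), by simp [bKeywords], rfl, (PySem.Chars.exists_prefix_drop_iff_isIn _ _).mpr h⟩
    · intro p hp hlt hex
      have hin := (PySem.Chars.exists_prefix_drop_iff_isIn _ _).mp hex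
      rcases bKeywords_cases p hp with rfl|rfl|rfl|rfl|rfl|rfl|rfl|rfl|rfl|rfl|rfl|rfl|rfl|rfl|rfl|rfl
      · exact h0 (Or.inl hin)
      · exact h0 (Or.inr (Or.inl hin))
      · exact h0 (Or.inr (Or.inr hin))
      · exact h1 (Or.inl hin)
      · exact h1 (Or.inr (Or.inl hin))
      · exact h1 (Or.inr (Or.inr hin))
      · exact h2 (Or.inl hin)
      · exact h2 (Or.inr (Or.inl hin))
      · exact h2 (Or.inr (Or.inr (Or.inl hin)))
      · exact h2 (Or.inr (Or.inr (Or.inr hin)))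
      · exact h3 (Or.inl hin)
      · exact h3 (Or.inr (Or.inl hin))
      · exact h3 (Or.inr (Or.inr hin))
      · exact absurd hlt (by norm_num)
      · exact absurd hlt (by norm_num)
      · exact absurd hlt (by norm_num)
  · refine bScan_eq_five L ?_
    intro p hp hex
    have hin := (PySem.Chars.exists_prefix_drop_iff_isIn _ _).mp hex
    rcases bKeywords_cases p hp with rfl|rfl|rfl|rfl|rfl|rfl|rfl|rfl|rfl|rfl|rfl|rfl|rfl|rfl|rfl|rfl
    · exact h0 (Or.inl hin)
    · exact h0 (Or.inr (Or.inl hin))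
    · exact h0 (Or.inr (Or.inr hin))
    · exact h1 (Or.inl hin)
    · exact h1 (Or.inr (Or.inl hin))
    · exact h1 (Or.inr (Or.inr hin))
    · exact h2 (Or.inl hin)
    · exact h2 (Or.inr (Or.inl hin))
    · exact h2 (Or.inr (Or.inr (Or.inl hin)))
    · exact h2 (Or.inr (Or.inr (Or.inr hin)))
    · exact h3 (Or.inl hin)
    · exact h3 (Or.inr (Or.inl hin))
    · exact h3 (Or.inr (Or.inr hin))
    · exact h4 (Or.inl hin)
    · exact h4 (Or.inr (Or.inl hin))
    · exact h4 (Or.inr (Or.inr hin))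

-- ===== VERDICT (by name: the statement is the Claim_ definition above) =====
theorem categorize_feedback_spec : Claim_equal_categorize_feedback := by
  intro message _
  unfold Spec_categorize_feedback categorize_feedback categorize_feedback_alt
  dsimp only
  rw [bScan_char]
  simp only [List.any_cons, List.any_nil, Bool.or_eq_true, Bool.or_false, PySem.Str.isIn_eq]
  split_ifs <;> first | omega | rfl
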